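-- pv_equiv track=rewrite | github.com/fr0gb1t/git-assistant | src/git_assistant/release/evaluator.py | extract_section_entries
-- ===== SOURCE A (Python) =====
-- def extract_section_entries(unreleased_block: str) -> dict[str, list[str]]:
--     """
--     Parse bullet entries from the changelog by section name.
--     """
--     entries: dict[str, list[str]] = {}
--     current_section: str | None = None
--
--     for raw_line in unreleased_block.splitlines():
--         line = raw_line.strip()
--         if not line:
--             continue
--
--         if line.startswith("### "):
--             current_section = line[4:].strip()
--             entries.setdefault(current_section, [])
--             continue
--
--         if line.startswith("- ") and current_section is not None:
--             entries[current_section].append(line[2:].strip())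
--
--     return entries
-- ===== SOURCE B (Python) =====
-- def extract_section_entries(unreleased_block: str) -> dict[str, list[str]]:
--     """
--     Parse bullet entries from the changelog by section name.
--
--     Two passes: first group the cleaned lines into (section, body_lines) groups,
--     then fold the groups into the result dict.
--     """
--     lines = [s for s in (raw.strip() for raw in unreleased_block.splitlines()) if s]
--
--     # pass 1: split into groups at each '### ' header; lines before the first
--     # header belong to no group and are dropped
--     groups: list[tuple[str, list[str]]] = []
--     for line in lines:
--         if line.startswith("### "):
--             groups.append((line[4:].strip(), []))
--         elif groups:
--             groups[-1][1].append(line)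
--
--     # pass 2: fold groups into the dict; duplicate section names merge in order,
--     # empty sections still appear
--     entries: dict[str, list[str]] = {}
--     for name, body in groups:
--         bucket = entries.setdefault(name, [])
--         bucket.extend(l[2:].strip() for l in body if l.startswith("- "))
--     return entries
-- ===== Notes on version B (the rewrite author's own statement) =====
-- stated objective: alternative
-- what changed: A's single stateful loop (dict + current-section variable mutated per line) is re-decomposed into two passes: first group the cleaned lines into an ordered list of (section, body-lines) groups split at '### ' headers, then fold the groups into the dict with setdefault/extend.
import Mathlib
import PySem

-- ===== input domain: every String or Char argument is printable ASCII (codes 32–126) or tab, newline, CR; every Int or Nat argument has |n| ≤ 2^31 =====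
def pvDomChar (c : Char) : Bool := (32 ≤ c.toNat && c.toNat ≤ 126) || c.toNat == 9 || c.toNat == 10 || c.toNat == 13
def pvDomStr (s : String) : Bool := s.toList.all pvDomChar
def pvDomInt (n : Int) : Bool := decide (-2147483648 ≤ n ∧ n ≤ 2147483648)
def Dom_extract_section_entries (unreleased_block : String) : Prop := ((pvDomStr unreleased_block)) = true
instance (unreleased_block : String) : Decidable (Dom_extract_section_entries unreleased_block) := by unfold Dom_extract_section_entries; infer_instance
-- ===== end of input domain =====

-- B re-decomposes A's single stateful loop into two passes (group the lines by '### ' header, then fold the groups into the dict); alternative structure, same cost.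

-- ===== PORT A =====
-- entries[current_section].append(...) is ported as Dict.modify with default []:
-- exact here because the key was always created by the preceding setdefault.
def extract_section_entries (unreleased_block : String) : List (String × List String) :=
  ((PySem.Str.splitlines unreleased_block).foldl
    (fun (st : PySem.Dict String (List String) × Option String) (raw_line : String) =>
      let line := PySem.Str.strip raw_line
      if line = "" then st
      else if PySem.Str.startswith line "### " then
        let cur := PySem.Str.strip (PySem.Str.slice line (some 4) none)
        (st.1.setdefault cur [], some cur)
      else if PySem.Str.startswith line "- " then
        match st.2 with
        | some c => (st.1.modify c [] (· ++ [PySem.Str.strip (PySem.Str.slice line (some 2) none)]), st.2)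
        | none => st
      else st)
    (PySem.Dict.empty, none)).1.items

-- ===== PORT B =====
def pvGStep (gs : List (String × List String)) (line : String) : List (String × List String) :=
  if PySem.Str.startswith line "### " then
    gs ++ [(PySem.Str.strip (PySem.Str.slice line (some 4) none), [])]
  else
    match gs.getLast? with
    | none => gs
    | some g => gs.dropLast ++ [(g.1, g.2 ++ [line])]

def pvBullets (body : List String) : List String :=
  (body.filter (fun l => PySem.Str.startswith l "- ")).map
    (fun l => PySem.Str.strip (PySem.Str.slice l (some 2) none))

def pvDStep (d : PySem.Dict String (List String)) (g : String × List String) :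
    PySem.Dict String (List String) :=
  (d.setdefault g.1 []).modify g.1 [] (· ++ pvBullets g.2)

def extract_section_entries_alt (unreleased_block : String) : List (String × List String) :=
  let lines := ((PySem.Str.splitlines unreleased_block).map PySem.Str.strip).filter (· ≠ "")
  let groups := lines.foldl pvGStep []
  (groups.foldl pvDStep PySem.Dict.empty).items

-- ===== PRECONDITION & SPEC =====
def Spec_extract_section_entries (unreleased_block : String) (out : List (String × List String)) : Prop := out = extract_section_entries_alt unreleased_block
instance (unreleased_block : String) (out : List (String × List String)) : Decidable (Spec_extract_section_entries unreleased_block out) := by unfold Spec_extract_section_entries; infer_instance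

-- ===== CLAIM (what is proved, stated in full; the proofs are below) =====
def Claim_equal_extract_section_entries : Prop := ∀ (unreleased_block : String), Dom_extract_section_entries unreleased_block → Spec_extract_section_entries unreleased_block (extract_section_entries unreleased_block)

-- ===== LEMMAS AND PROOFS =====

-- A's loop step, named (defeq to the lambda in the port of A)
def pvStepA (st : PySem.Dict String (List String) × Option String) (raw_line : String) :
    PySem.Dict String (List String) × Option String :=
  let line := PySem.Str.strip raw_line
  if line = "" then st
  else if PySem.Str.startswith line "### " then
    let cur := PySem.Str.strip (PySem.Str.slice line (some 4) none)
    (st.1.setdefault cur [], some cur)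
  else if PySem.Str.startswith line "- " then
    match st.2 with
    | some c => (st.1.modify c [] (· ++ [PySem.Str.strip (PySem.Str.slice line (some 2) none)]), st.2)
    | none => st
  else st

-- A's step on an already-stripped line
def pvStepC (st : PySem.Dict String (List String) × Option String) (line : String) :
    PySem.Dict String (List String) × Option String :=
  if line = "" then st
  else if PySem.Str.startswith line "### " then
    (st.1.setdefault (PySem.Str.strip (PySem.Str.slice line (some 4) none)) [],
     some (PySem.Str.strip (PySem.Str.slice line (some 4) none)))
  else if PySem.Str.startswith line "- " then
    match st.2 with
    | some c => (st.1.modify c [] (· ++ [PySem.Str.strip (PySem.Str.slice line (some 2) none)]), st.2)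
    | none => st
  else st

def pvNH (x : String) : Bool := !PySem.Str.startswith x "### "

-- specification of the grouping pass, by span recursion
def pvGroups : List String → List (String × List String)
  | [] => []
  | l :: rest =>
    if PySem.Str.startswith l "### " then
      (PySem.Str.strip (PySem.Str.slice l (some 4) none), rest.takeWhile pvNH) ::
        pvGroups (rest.dropWhile pvNH)
    else pvGroups rest
termination_by l => l.length
decreasing_by
  · exact Nat.lt_succ_of_le (List.length_dropWhile_le _ _)
  · simp

lemma pvA_eq (s : String) :
    extract_section_entries s =
      ((PySem.Str.splitlines s).foldl pvStepA (PySem.Dict.empty, none)).1.items := rfl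

lemma pvStepA_eq (st : PySem.Dict String (List String) × Option String) (raw : String) :
    pvStepA st raw = pvStepC st (PySem.Str.strip raw) := rfl

lemma pvFold_clean (raws : List String) (st : PySem.Dict String (List String) × Option String) :
    raws.foldl pvStepA st = ((raws.map PySem.Str.strip).filter (· ≠ "")).foldl pvStepC st := by
  induction raws generalizing st with
  | nil => rfl
  | cons r rs ih =>
    simp only [List.foldl_cons, List.map_cons, List.filter_cons]
    rw [pvStepA_eq]
    by_cases h : PySem.Str.strip r = ""
    · simp [h, pvStepC, ih]
    · simp [h, ih]

lemma pvHeader_ne_empty {l : String} (h : PySem.Str.startswith l "### " = true) : l ≠ "" := by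
  intro he; subst he; exact absurd h (by decide)

lemma pvModify_modify (d : PySem.Dict String (List String)) (k : String) (xs ys : List String) :
    (d.modify k [] (· ++ xs)).modify k [] (· ++ ys) = d.modify k [] (· ++ (xs ++ ys)) := by
  simp [PySem.Dict.modify, PySem.Dict.getD_insert_self, PySem.Dict.insert_insert_self,
    List.append_assoc]

lemma pvInsert_getD_self (d : PySem.Dict String (List String)) (k : String) (dflt : List String)
    (hc : d.contains k = true) (hnd : d.keys.Nodup) : d.insert k (d.getD k dflt) = d := by
  apply PySem.Dict.ext
  rw [PySem.Dict.items_insert_of_contains _ _ hc]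
  conv_rhs => rw [← List.map_id d.items]
  refine List.map_congr_left ?_
  intro p hp
  obtain ⟨a, v⟩ := p
  by_cases hak : a = k
  · subst hak
    have hg : d.getD a dflt = v := by
      apply PySem.Dict.getD_of_mem_items <;> assumption
    simp [hg]
  · simp [hak]

lemma pvModify_nil (d : PySem.Dict String (List String)) (k : String)
    (hc : d.contains k = true) (hnd : d.keys.Nodup) : d.modify k [] (· ++ []) = d := by
  have h := pvInsert_getD_self d k [] hc hnd
  simp only [PySem.Dict.modify, List.append_nil]
  exact h

lemma pvContains_modify_self (d : PySem.Dict String (List String)) (k : String)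
    (f : List String → List String) : (d.modify k [] f).contains k = true := by
  simp [PySem.Dict.modify, PySem.Dict.contains_insert_self]

lemma pvNodup_keys_insert (d : PySem.Dict String (List String)) (k : String) (v : List String)
    (h : d.keys.Nodup) : (d.insert k v).keys.Nodup := by
  apply PySem.Dict.nodup_keys_insert <;> assumption

lemma pvNodup_keys_modify (d : PySem.Dict String (List String)) (k : String)
    (f : List String → List String) (h : d.keys.Nodup) : (d.modify k [] f).keys.Nodup := by
  simp only [PySem.Dict.modify]
  exact pvNodup_keys_insert d k _ h

lemma pvNodup_keys_setdefault (d : PySem.Dict String (List String)) (k : String)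
    (v : List String) (h : d.keys.Nodup) : (d.setdefault k v).keys.Nodup := by
  by_cases hc : d.contains k = true
  · rw [PySem.Dict.setdefault_of_contains _ _ hc]; exact h
  · rw [PySem.Dict.setdefault_of_not_contains _ _ (by simpa using hc)]
    exact pvNodup_keys_insert d k v h

lemma pvContains_setdefault_self (d : PySem.Dict String (List String)) (k : String)
    (v : List String) : (d.setdefault k v).contains k = true := by
  simp [PySem.Dict.contains_setdefault]

-- A's loop over the body lines of one section appends exactly that section's bullets
lemma pvFoldC_body (body : List String) :
    ∀ (d : PySem.Dict String (List String)) (c : String),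
    (∀ l ∈ body, l ≠ "") → (∀ l ∈ body, PySem.Str.startswith l "### " = false) →
    d.contains c = true → d.keys.Nodup →
    body.foldl pvStepC (d, some c) = (d.modify c [] (· ++ pvBullets body), some c) := by
  induction body with
  | nil =>
    intro d c _ _ hc hnd
    simp only [List.foldl_nil, pvBullets, List.filter_nil, List.map_nil]
    rw [pvModify_nil d c hc hnd]
  | cons l body' ih =>
    intro d c hs hh hc hnd
    have hne : l ≠ "" := hs l (by simp)
    have hnh : PySem.Str.startswith l "### " = false := hh l (by simp)
    simp only [List.foldl_cons]
    by_cases hb : PySem.Str.startswith l "- " = true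
    · have hstep : pvStepC (d, some c) l =
          (d.modify c [] (· ++ [PySem.Str.strip (PySem.Str.slice l (some 2) none)]), some c) := by
        unfold pvStepC
        rw [if_neg hne, if_neg (by rw [hnh]; simp), if_pos hb]
      rw [hstep, ih _ c (fun x hx => hs x (by simp [hx])) (fun x hx => hh x (by simp [hx]))
        (pvContains_modify_self d c _) (pvNodup_keys_modify d c _ hnd), pvModify_modify]
      have hbul : pvBullets (l :: body') =
          PySem.Str.strip (PySem.Str.slice l (some 2) none) :: pvBullets body' := by
        have hb' : PySem.Chars.startswith l.toList ['-', ' '] = true := by simpa using hb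
        simp [pvBullets, List.filter_cons, hb']
      rw [hbul]
      rfl
    · have hstep : pvStepC (d, some c) l = (d, some c) := by
        unfold pvStepC
        rw [if_neg hne, if_neg (by rw [hnh]; simp),
          if_neg (by simpa using hb)]
      rw [hstep, ih _ c (fun x hx => hs x (by simp [hx])) (fun x hx => hh x (by simp [hx])) hc hnd]
      have hbul : pvBullets (l :: body') = pvBullets body' := by
        simp only [pvBullets, List.filter_cons]
        rw [show PySem.Str.startswith l "- " = false by simpa using hb]
        simp
      rw [hbul]

-- once the next line is a header (or the input ends), the open section is irrelevant
lemma pvFoldC_forget (lines : List String) (d : PySem.Dict String (List String)) (c : String)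
    (h : lines = [] ∨ ∃ x xs, lines = x :: xs ∧ PySem.Str.startswith x "### " = true) :
    (lines.foldl pvStepC (d, some c)).1 = (lines.foldl pvStepC (d, none)).1 := by
  rcases h with h | ⟨x, xs, rfl, hx⟩
  · subst h; rfl
  · have hne : x ≠ "" := pvHeader_ne_empty hx
    have hstep : ∀ o : Option String, pvStepC (d, o) x =
        (d.setdefault (PySem.Str.strip (PySem.Str.slice x (some 4) none)) [],
         some (PySem.Str.strip (PySem.Str.slice x (some 4) none))) := by
      intro o
      unfold pvStepC
      rw [if_neg hne, if_pos hx]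
    simp only [List.foldl_cons, hstep]

lemma pvDropWhile_head (l : List String) :
    l.dropWhile pvNH = [] ∨
      ∃ x xs, l.dropWhile pvNH = x :: xs ∧ PySem.Str.startswith x "### " = true := by
  induction l with
  | nil => exact Or.inl rfl
  | cons a l ih =>
    by_cases ha : PySem.Str.startswith a "### " = true
    · right
      refine ⟨a, l, ?_, ha⟩
      rw [List.dropWhile_cons, if_neg (by simp [pvNH]; simpa using ha)]
    · rw [List.dropWhile_cons, if_pos (by simp [pvNH]; simpa using ha)]
      exact ih

-- MAIN: A's cleaned-line fold equals B's per-group fold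
lemma pvFoldC_groups (lines : List String) :
    ∀ (d : PySem.Dict String (List String)),
    (∀ l ∈ lines, l ≠ "") → d.keys.Nodup →
    (lines.foldl pvStepC (d, none)).1 = (pvGroups lines).foldl pvDStep d := by
  induction lines using pvGroups.induct with
  | case1 => intro d _ _; simp [pvGroups]
  | case2 l rest hh ih =>
    intro d hs hnd
    have hne : l ≠ "" := pvHeader_ne_empty hh
    have hstep : pvStepC (d, none) l =
        (d.setdefault (PySem.Str.strip (PySem.Str.slice l (some 4) none)) [],
         some (PySem.Str.strip (PySem.Str.slice l (some 4) none))) := by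
      unfold pvStepC
      rw [if_neg hne, if_pos hh]
    have hbody_mem : ∀ x ∈ rest.takeWhile pvNH, x ∈ rest := fun x hx =>
      (List.takeWhile_sublist _).mem hx
    have hdrop_mem : ∀ x ∈ rest.dropWhile pvNH, x ∈ rest := fun x hx =>
      (List.dropWhile_sublist _).mem hx
    have hbody_nh : ∀ x ∈ rest.takeWhile pvNH, PySem.Str.startswith x "### " = false := by
      intro x hx
      have hpx := List.mem_takeWhile_imp hx
      simpa [pvNH] using hpx
    have hnd' := pvNodup_keys_setdefault d (PySem.Str.strip (PySem.Str.slice l (some 4) none)) [] hnd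
    have hc' := pvContains_setdefault_self d (PySem.Str.strip (PySem.Str.slice l (some 4) none)) []
    simp only [List.foldl_cons, hstep]
    conv_lhs => rw [← List.takeWhile_append_dropWhile (p := pvNH) (l := rest)]
    rw [List.foldl_append]
    rw [pvFoldC_body _ _ _ (fun x hx => hs x (by simp [hbody_mem x hx])) hbody_nh hc' hnd']
    rw [pvFoldC_forget _ _ _ (pvDropWhile_head rest)]
    rw [ih _ (fun x hx => hs x (by simp [hdrop_mem x hx])) (pvNodup_keys_modify _ _ _ hnd')]
    have hh' : PySem.Chars.startswith l.toList ['#', '#', '#', ' '] = true := by simpa using hh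
    have hgr : pvGroups (l :: rest) =
        (PySem.Str.strip (PySem.Str.slice l (some 4) none), rest.takeWhile pvNH) ::
          pvGroups (rest.dropWhile pvNH) := by
      rw [pvGroups]; simp [hh']
    rw [hgr]
    rfl
  | case3 l rest hh ih =>
    intro d hs hnd
    have hstep : pvStepC (d, none) l = (d, none) := by
      by_cases hne : l = ""
      · unfold pvStepC; rw [if_pos hne]
      · unfold pvStepC
        rw [if_neg hne, if_neg hh]
        by_cases hb : PySem.Str.startswith l "- " = true
        · rw [if_pos hb]
        · rw [if_neg (by simpa using hb)]
    simp only [List.foldl_cons, hstep]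
    rw [ih d (fun x hx => hs x (by simp [hx])) hnd]
    have hh' : PySem.Chars.startswith l.toList ['#', '#', '#', ' '] = false := by simpa using hh
    have hgr : pvGroups (l :: rest) = pvGroups rest := by rw [pvGroups]; simp [hh']
    rw [hgr]

-- B's first pass over one section body appends its lines to the open group
lemma pvGfold_body (body : List String) :
    ∀ (gs : List (String × List String)) (n : String) (b : List String),
    (∀ l ∈ body, PySem.Str.startswith l "### " = false) →
    body.foldl pvGStep (gs ++ [(n, b)]) = gs ++ [(n, b ++ body)] := by
  induction body with
  | nil => intro gs n b _; simp
  | cons l body' ih =>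
    intro gs n b hh
    have hnh := hh l (by simp)
    have hstep : pvGStep (gs ++ [(n, b)]) l = gs ++ [(n, b ++ [l])] := by
      unfold pvGStep
      rw [if_neg (by rw [hnh]; simp)]
      rw [List.getLast?_concat, List.dropLast_concat]
    simp only [List.foldl_cons, hstep]
    rw [ih gs n (b ++ [l]) (fun x hx => hh x (by simp [hx]))]
    simp

lemma pvGfold_main (lines : List String) :
    ∀ (gs : List (String × List String)),
    (lines = [] ∨ ∃ x xs, lines = x :: xs ∧ PySem.Str.startswith x "### " = true) →
    lines.foldl pvGStep gs = gs ++ pvGroups lines := by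
  induction lines using pvGroups.induct with
  | case1 => intro gs _; simp [pvGroups]
  | case2 l rest hh ih =>
    intro gs _
    have hstep : pvGStep gs l =
        gs ++ [(PySem.Str.strip (PySem.Str.slice l (some 4) none), [])] := by
      unfold pvGStep
      rw [if_pos hh]
    have hbody_nh : ∀ x ∈ rest.takeWhile pvNH, PySem.Str.startswith x "### " = false := by
      intro x hx
      have hpx := List.mem_takeWhile_imp hx
      simpa [pvNH] using hpx
    simp only [List.foldl_cons, hstep]
    conv_lhs => rw [← List.takeWhile_append_dropWhile (p := pvNH) (l := rest)]
    rw [List.foldl_append]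
    rw [pvGfold_body _ _ _ _ hbody_nh]
    rw [ih _ (pvDropWhile_head rest)]
    have hh' : PySem.Chars.startswith l.toList ['#', '#', '#', ' '] = true := by simpa using hh
    have hgr : pvGroups (l :: rest) =
        (PySem.Str.strip (PySem.Str.slice l (some 4) none), rest.takeWhile pvNH) ::
          pvGroups (rest.dropWhile pvNH) := by
      rw [pvGroups]; simp [hh']
    rw [hgr]
    simp
  | case3 l rest hh ih =>
    intro gs h
    rcases h with h | ⟨x, xs, hx, hhx⟩
    · exact absurd h (by simp)
    · injection hx with h1 h2
      subst h1
      have hh' : PySem.Chars.startswith l.toList ['#', '#', '#', ' '] = false := by simpa using hh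
      simp [hh'] at hhx

lemma pvGfold_groups (lines : List String) :
    lines.foldl pvGStep [] = pvGroups lines := by
  induction lines using pvGroups.induct with
  | case1 => simp [pvGroups]
  | case2 l rest hh ih =>
    simpa using pvGfold_main (l :: rest) [] (Or.inr ⟨l, rest, rfl, hh⟩)
  | case3 l rest hh ih =>
    have hstep : pvGStep [] l = [] := by
      unfold pvGStep
      rw [if_neg hh]
      rfl
    simp only [List.foldl_cons, hstep]
    rw [ih]
    have hh' : PySem.Chars.startswith l.toList ['#', '#', '#', ' '] = false := by simpa using hh
    have hgr : pvGroups (l :: rest) = pvGroups rest := by rw [pvGroups]; simp [hh']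
    rw [hgr]

-- ===== VERDICT (by name: the statement is the Claim_ definition above) =====
theorem extract_section_entries_spec : Claim_equal_extract_section_entries := by
  intro s _
  unfold Spec_extract_section_entries
  rw [pvA_eq, pvFold_clean]
  have hs : ∀ l ∈ ((PySem.Str.splitlines s).map PySem.Str.strip).filter (· ≠ ""), l ≠ "" := by
    intro l hl
    simpa using (List.mem_filter.mp hl).2
  have hnd : (PySem.Dict.empty : PySem.Dict String (List String)).keys.Nodup :=
    PySem.Dict.nodup_keys_empty
  rw [pvFoldC_groups _ _ hs hnd]
  have hB : extract_section_entries_alt s =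
      (((((PySem.Str.splitlines s).map PySem.Str.strip).filter (· ≠ "")).foldl pvGStep
        []).foldl pvDStep PySem.Dict.empty).items := rfl
  rw [hB, pvGfold_groups]
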